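-- pv_equiv track=rewrite | github.com/ipqhjjybj/trade_strategy | tumbler/function/function.py | get_sum_dic
-- ===== SOURCE A (Python) =====
-- def get_sum_dic(dic):
--     sum_dic = {}
--     ks = list(dic.keys())
--     ks.sort()
--     ss = 0
--     for k in ks:
--         ss += dic[k]
--         sum_dic[k] = ss
--     return sum_dic
-- ===== SOURCE B (Python) =====
-- def get_sum_dic(dic):
--     # Back-to-front: start from the grand total and subtract values while
--     # walking the sorted keys in reverse, then reverse the built pairs.
--     keys = sorted(dic)
--     rem = sum(dic.values())
--     out = []
--     for k in reversed(keys):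
--         out.append((k, rem))
--         rem -= dic[k]
--     return dict(reversed(out))
-- ===== Notes on version B (the rewrite author's own statement) =====
-- stated objective: alternative
-- what changed: Instead of A's forward running-sum accumulation, B computes the grand total of all values first and builds the result back-to-front, walking the sorted keys in reverse and subtracting each value from the remaining total, then reverses the built pair list into the dict.
import Mathlib
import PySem

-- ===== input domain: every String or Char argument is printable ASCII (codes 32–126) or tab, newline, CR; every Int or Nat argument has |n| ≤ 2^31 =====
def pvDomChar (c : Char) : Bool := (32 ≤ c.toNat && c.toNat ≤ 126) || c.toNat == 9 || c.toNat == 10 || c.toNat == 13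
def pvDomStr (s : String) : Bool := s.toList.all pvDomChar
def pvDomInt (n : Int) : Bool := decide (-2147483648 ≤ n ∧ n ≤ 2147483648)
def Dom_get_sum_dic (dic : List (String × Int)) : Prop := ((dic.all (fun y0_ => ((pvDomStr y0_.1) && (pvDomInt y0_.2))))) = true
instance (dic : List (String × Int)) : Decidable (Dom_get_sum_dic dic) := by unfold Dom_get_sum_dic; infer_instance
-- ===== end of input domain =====

-- B replaces A's forward running-sum loop by a back-to-front build: total first, then subtract values while walking the sorted keys in reverse (alternative decomposition; same cost).

-- ===== PORT A =====
def get_sum_dic (dic : List (String × Int)) : List (String × Int) :=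
  let d := PySem.Dict.ofList dic
  let ks := PySem.List.sorted d.keys (fun k => k) false
  let r := ks.foldl (fun (p : Int × PySem.Dict String Int) k =>
      let ss := p.1 + d.getD k 0        -- dic[k]: k is always a key of dic here
      (ss, p.2.insert k ss)) ((0 : Int), (PySem.Dict.empty : PySem.Dict String Int))
  r.2.items

-- ===== PORT B =====
def get_sum_dic_alt (dic : List (String × Int)) : List (String × Int) :=
  let d := PySem.Dict.ofList dic
  let ks := PySem.List.sorted d.keys (fun k => k) false     -- keys = sorted(dic)
  let rem0 := d.values.foldl (fun acc v => acc + v) 0       -- rem = sum(dic.values())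
  let r := ks.reverse.foldl (fun (p : List (String × Int) × Int) k =>
      (p.1 ++ [(k, p.2)], p.2 - d.getD k 0))                -- out.append((k, rem)); rem -= dic[k]
    (([] : List (String × Int)), rem0)
  (PySem.Dict.ofList r.1.reverse).items                     -- dict(reversed(out))

-- ===== PRECONDITION & SPEC =====
def Spec_get_sum_dic (dic : List (String × Int)) (out : List (String × Int)) : Prop := out = get_sum_dic_alt dic
instance (dic : List (String × Int)) (out : List (String × Int)) : Decidable (Spec_get_sum_dic dic out) := by unfold Spec_get_sum_dic; infer_instance

-- ===== CLAIM (what is proved, stated in full; the proofs are below) =====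
def Claim_equal_get_sum_dic : Prop := ∀ (dic : List (String × Int)), Dom_get_sum_dic dic → Spec_get_sum_dic dic (get_sum_dic dic)

-- ===== LEMMAS AND PROOFS =====
-- prefix sums starting from s (proof-side normal form both loops are reduced to)
def accSums (s : Int) : List Int → List Int
  | [] => []
  | v :: vs => (s + v) :: accSums (s + v) vs

theorem length_accSums (s : Int) (vs : List Int) : (accSums s vs).length = vs.length := by
  induction vs generalizing s with
  | nil => rfl
  | cons v vs ih => simp [accSums, ih]

-- A's loop over fresh distinct keys appends exactly the (key, prefix-sum) pairs.
theorem loop_items (d : PySem.Dict String Int) :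
    ∀ (ks : List String) (ss : Int) (sd : PySem.Dict String Int),
      ks.Nodup → (∀ k ∈ ks, sd.contains k = false) →
      (ks.foldl (fun (p : Int × PySem.Dict String Int) k =>
          let s := p.1 + d.getD k 0
          (s, p.2.insert k s)) (ss, sd)).2.items
        = sd.items ++ ks.zip (accSums ss (ks.map (fun k => d.getD k 0))) := by
  intro ks
  induction ks with
  | nil => intro ss sd _ _; simp [accSums]
  | cons k t ih =>
    intro ss sd hnd hfresh
    have hk : sd.contains k = false := hfresh k (by simp)
    have hfresh' : ∀ k' ∈ t, (sd.insert k (ss + d.getD k 0)).contains k' = false := by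
      intro k' hk'
      have hne : k' ≠ k := fun h => (List.nodup_cons.mp hnd).1 (h ▸ hk')
      rw [PySem.Dict.contains_insert]
      simp [hne, hfresh k' (List.mem_cons_of_mem _ hk')]
    simp only [List.foldl_cons, List.map_cons, accSums, List.zip_cons_cons]
    rw [ih (ss + d.getD k 0) _ (List.nodup_cons.mp hnd).2 hfresh',
        PySem.Dict.items_insert_of_not_contains (h := hk)]
    simp

-- B's reverse loop, started from s + (sum of the values), builds the reversed prefix-sum pairs.
theorem revloop (v : String → Int) :
    ∀ (ks : List String) (s : Int) (acc : List (String × Int)),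
      ks.reverse.foldl (fun (p : List (String × Int) × Int) k =>
          (p.1 ++ [(k, p.2)], p.2 - v k)) (acc, s + (ks.map v).sum)
        = (acc ++ (ks.zip (accSums s (ks.map v))).reverse, s) := by
  intro ks
  induction ks with
  | nil => intro s acc; simp
  | cons k t ih =>
    intro s acc
    have hsum : s + ((k :: t).map v).sum = (s + v k) + (t.map v).sum := by
      simp [List.map_cons]; ring
    rw [List.reverse_cons, List.foldl_append, hsum, ih (s + v k) acc]
    simp [accSums, List.append_assoc]

-- a dict built from pairs with distinct keys has exactly those pairs as items
theorem items_ofList_of_nodup (l : List (String × Int)) (h : (l.map Prod.fst).Nodup) :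
    (PySem.Dict.ofList l).items = l := by
  unfold PySem.Dict.ofList PySem.Dict.update
  rw [PySem.Dict.items_foldl_insert_fresh l Prod.fst Prod.snd _
      (fun a _ => PySem.Dict.contains_empty a.1) h]
  simp [PySem.Dict.empty]

-- ===== VERDICT (by name: the statement is the Claim_ definition above) =====
theorem get_sum_dic_spec : Claim_equal_get_sum_dic := by
  intro dic _
  unfold Spec_get_sum_dic get_sum_dic get_sum_dic_alt
  dsimp only
  set d := PySem.Dict.ofList dic with hd
  set ks := PySem.List.sorted d.keys (fun k => k) false with hks
  have hperm : ks.Perm d.keys := PySem.List.sorted_perm _ _ _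
  have hndk : d.keys.Nodup := PySem.Dict.nodup_keys_ofList dic
  have hnd : ks.Nodup := hperm.nodup_iff.mpr hndk
  have hvals : d.values.foldl (fun acc v => acc + v) 0
      = 0 + (ks.map (fun k => d.getD k 0)).sum := by
    have h1 : d.values.foldl (fun acc v => acc + v) 0 = 0 + (d.values.map (fun x => x)).sum :=
      PySem.List.foldl_add d.values (fun x => x) 0
    rw [h1]
    have hid : List.map (fun x : Int => x) d.values = d.values := by simp
    rw [hid, PySem.Dict.values_eq_map_keys d hndk 0,
        (hperm.map (fun k => d.getD k 0)).sum_eq]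
  -- B side
  rw [hvals, revloop (fun k => d.getD k 0) ks 0 []]
  simp only [List.nil_append, List.reverse_reverse]
  -- A side
  rw [loop_items d ks 0 PySem.Dict.empty hnd (fun k _ => PySem.Dict.contains_empty k)]
  rw [items_ofList_of_nodup]
  · simp [PySem.Dict.empty]
  · rw [List.map_fst_zip]
    · exact hnd
    · rw [length_accSums, List.length_map]
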